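-- pv_equiv track=rewrite | github.com/davesnx/styled-ppx | packages/css-property-parser/lib/scripts/analyze_parser.py | _categorize_function
-- ===== SOURCE A (Python) =====
-- def _categorize_function(func_name: str, definition: str) -> str:
--     """Categorize CSS functions by purpose"""
--
--     # Math functions
--     if func_name in ['calc', 'min', 'max', 'clamp']:
--         return 'math'
--
--     # Color functions
--     if func_name in ['rgb', 'rgba', 'hsl', 'hsla', 'color_mix']:
--         return 'color'
--
--     # Transform functions
--     if any(x in func_name for x in ['matrix', 'translate', 'rotate', 'scale', 'skew']):
--         return 'transform'
--
--     # Filter functions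
--     if any(x in func_name for x in ['blur', 'brightness', 'contrast', 'grayscale', 'hue_rotate', 'invert', 'opacity', 'saturate', 'sepia']):
--         return 'filter'
--
--     # Shape functions
--     if func_name in ['circle', 'ellipse', 'polygon', 'inset', 'path']:
--         return 'shape'
--
--     # Gradient functions
--     if 'gradient' in func_name:
--         return 'gradient'
--
--     # Grid functions
--     if func_name in ['minmax', 'fit_content', 'repeat']:
--         return 'grid'
--
--     # Image functions
--     if any(x in func_name for x in ['image', 'cross_fade']):
--         return 'image'
--
--     # Utility functions
--     if func_name in ['attr', 'var', 'env']:
--         return 'utility'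
--
--     # Counter functions
--     if 'counter' in func_name:
--         return 'counter'
--
--     return 'other'
-- ===== SOURCE B (Python) =====
-- # B: flatten the rule groups into one keyword table (priority, category, exact?, word)
-- # and compute the minimum-priority matching keyword in a single reduction; the staged
-- # first-match if-chain disappears (selection is by priority, not by scan order).
-- _GROUPS = [
--     ('math', True, ['calc', 'min', 'max', 'clamp']),
--     ('color', True, ['rgb', 'rgba', 'hsl', 'hsla', 'color_mix']),
--     ('transform', False, ['matrix', 'translate', 'rotate', 'scale', 'skew']),
--     ('filter', False, ['blur', 'brightness', 'contrast', 'grayscale', 'hue_rotate',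
--                        'invert', 'opacity', 'saturate', 'sepia']),
--     ('shape', True, ['circle', 'ellipse', 'polygon', 'inset', 'path']),
--     ('gradient', False, ['gradient']),
--     ('grid', True, ['minmax', 'fit_content', 'repeat']),
--     ('image', False, ['image', 'cross_fade']),
--     ('utility', True, ['attr', 'var', 'env']),
--     ('counter', False, ['counter']),
-- ]
--
-- _KEYWORDS = [(p, cat, exact, w)
--              for p, (cat, exact, words) in enumerate(_GROUPS)
--              for w in words]
--
--
-- def _categorize_function(func_name: str, definition: str) -> str:
--     best_p, best_c = len(_GROUPS), 'other'
--     for p, cat, exact, word in _KEYWORDS: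
--         if p < best_p and (func_name == word if exact else word in func_name):
--             best_p, best_c = p, cat
--     return best_c
-- ===== Notes on version B (the rewrite author's own statement) =====
-- stated objective: alternative
-- what changed: Replaced the staged first-match if-chain by a flat keyword table (priority, category, exact?, word) and a single running-minimum reduction that returns the minimum-priority matching keyword, with 'other' as the identity element.
import Mathlib
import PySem

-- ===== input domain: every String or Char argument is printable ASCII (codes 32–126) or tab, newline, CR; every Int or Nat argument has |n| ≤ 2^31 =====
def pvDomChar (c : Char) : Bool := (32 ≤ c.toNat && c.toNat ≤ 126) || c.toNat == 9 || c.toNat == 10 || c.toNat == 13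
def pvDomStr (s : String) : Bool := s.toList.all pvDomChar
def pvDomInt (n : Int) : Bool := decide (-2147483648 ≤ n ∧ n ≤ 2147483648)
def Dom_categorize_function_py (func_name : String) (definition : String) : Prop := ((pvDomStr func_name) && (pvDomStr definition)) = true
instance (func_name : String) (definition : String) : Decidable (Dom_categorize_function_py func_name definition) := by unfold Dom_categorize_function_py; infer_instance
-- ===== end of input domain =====

-- B flattens A's staged if-chain into one keyword table (priority, category, exact?, word)
-- and returns the minimum-priority matching keyword via a single running-minimum reduction
-- (objective: alternative; same cost).

-- ===== PORT A =====
def categorize_function_py (func_name : String) (definition : String) : String :=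
  if ["calc", "min", "max", "clamp"].contains func_name then "math"
  else if ["rgb", "rgba", "hsl", "hsla", "color_mix"].contains func_name then "color"
  else if ["matrix", "translate", "rotate", "scale", "skew"].any (fun x => PySem.Str.isIn x func_name) then "transform"
  else if ["blur", "brightness", "contrast", "grayscale", "hue_rotate", "invert", "opacity", "saturate", "sepia"].any (fun x => PySem.Str.isIn x func_name) then "filter"
  else if ["circle", "ellipse", "polygon", "inset", "path"].contains func_name then "shape"
  else if PySem.Str.isIn "gradient" func_name then "gradient"
  else if ["minmax", "fit_content", "repeat"].contains func_name then "grid"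
  else if ["image", "cross_fade"].any (fun x => PySem.Str.isIn x func_name) then "image"
  else if ["attr", "var", "env"].contains func_name then "utility"
  else if PySem.Str.isIn "counter" func_name then "counter"
  else "other"

-- ===== PORT B =====
-- the flat keyword table: (priority, category, exact?, word)
def pvKeywords : List (Nat × String × Bool × String) :=
  [(0, "math", true, "calc"),
   (0, "math", true, "min"),
   (0, "math", true, "max"),
   (0, "math", true, "clamp"),
   (1, "color", true, "rgb"),
   (1, "color", true, "rgba"),
   (1, "color", true, "hsl"),
   (1, "color", true, "hsla"),
   (1, "color", true, "color_mix"),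
   (2, "transform", false, "matrix"),
   (2, "transform", false, "translate"),
   (2, "transform", false, "rotate"),
   (2, "transform", false, "scale"),
   (2, "transform", false, "skew"),
   (3, "filter", false, "blur"),
   (3, "filter", false, "brightness"),
   (3, "filter", false, "contrast"),
   (3, "filter", false, "grayscale"),
   (3, "filter", false, "hue_rotate"),
   (3, "filter", false, "invert"),
   (3, "filter", false, "opacity"),
   (3, "filter", false, "saturate"),
   (3, "filter", false, "sepia"),
   (4, "shape", true, "circle"),
   (4, "shape", true, "ellipse"),
   (4, "shape", true, "polygon"),
   (4, "shape", true, "inset"),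
   (4, "shape", true, "path"),
   (5, "gradient", false, "gradient"),
   (6, "grid", true, "minmax"),
   (6, "grid", true, "fit_content"),
   (6, "grid", true, "repeat"),
   (7, "image", false, "image"),
   (7, "image", false, "cross_fade"),
   (8, "utility", true, "attr"),
   (8, "utility", true, "var"),
   (8, "utility", true, "env"),
   (9, "counter", false, "counter")]

-- running-minimum reduction: keep the lowest-priority matching keyword ('other' = priority 10)
def categorize_function_py_alt (func_name : String) (definition : String) : String :=
  (pvKeywords.foldl
    (fun best kw =>
      if decide (kw.1 < best.1) && (if kw.2.2.1 then func_name == kw.2.2.2 else PySem.Str.isIn kw.2.2.2 func_name)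
      then (kw.1, kw.2.1) else best)
    (10, "other")).2

-- ===== PRECONDITION & SPEC =====
def Spec_categorize_function_py (func_name : String) (definition : String) (out : String) : Prop := out = categorize_function_py_alt func_name definition
instance (func_name : String) (definition : String) (out : String) : Decidable (Spec_categorize_function_py func_name definition out) := by unfold Spec_categorize_function_py; infer_instance

-- ===== CLAIM (what is proved, stated in full; the proofs are below) =====
def Claim_equal_categorize_function_py : Prop := ∀ (func_name : String) (definition : String), Dom_categorize_function_py func_name definition → Spec_categorize_function_py func_name definition (categorize_function_py func_name definition)

-- ===== LEMMAS AND PROOFS =====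

-- ===== VERDICT (by name: the statement is the Claim_ definition above) =====
set_option maxRecDepth 16384 in
theorem categorize_function_py_spec : Claim_equal_categorize_function_py := by
  intro f d _
  unfold Spec_categorize_function_py
  by_cases h1 : f = "calc"
  · subst h1; rfl
  by_cases h2 : f = "min"
  · subst h2; rfl
  by_cases h3 : f = "max"
  · subst h3; rfl
  by_cases h4 : f = "clamp"
  · subst h4; rfl
  by_cases h5 : f = "rgb"
  · subst h5; rfl
  by_cases h6 : f = "rgba"
  · subst h6; rfl
  by_cases h7 : f = "hsl"
  · subst h7; rfl
  by_cases h8 : f = "hsla"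
  · subst h8; rfl
  by_cases h9 : f = "color_mix"
  · subst h9; rfl
  by_cases h10 : PySem.Str.isIn "matrix" f = true
  · simp_all [categorize_function_py, categorize_function_py_alt, pvKeywords]
  by_cases h11 : PySem.Str.isIn "translate" f = true
  · simp_all [categorize_function_py, categorize_function_py_alt, pvKeywords]
  by_cases h12 : PySem.Str.isIn "rotate" f = true
  · simp_all [categorize_function_py, categorize_function_py_alt, pvKeywords]
  by_cases h13 : PySem.Str.isIn "scale" f = true
  · simp_all [categorize_function_py, categorize_function_py_alt, pvKeywords]
  by_cases h14 : PySem.Str.isIn "skew" f = true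
  · simp_all [categorize_function_py, categorize_function_py_alt, pvKeywords]
  by_cases h15 : PySem.Str.isIn "blur" f = true
  · simp_all [categorize_function_py, categorize_function_py_alt, pvKeywords]
  by_cases h16 : PySem.Str.isIn "brightness" f = true
  · simp_all [categorize_function_py, categorize_function_py_alt, pvKeywords]
  by_cases h17 : PySem.Str.isIn "contrast" f = true
  · simp_all [categorize_function_py, categorize_function_py_alt, pvKeywords]
  by_cases h18 : PySem.Str.isIn "grayscale" f = true
  · simp_all [categorize_function_py, categorize_function_py_alt, pvKeywords]
  by_cases h19 : PySem.Str.isIn "hue_rotate" f = true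
  · simp_all [categorize_function_py, categorize_function_py_alt, pvKeywords]
  by_cases h20 : PySem.Str.isIn "invert" f = true
  · simp_all [categorize_function_py, categorize_function_py_alt, pvKeywords]
  by_cases h21 : PySem.Str.isIn "opacity" f = true
  · simp_all [categorize_function_py, categorize_function_py_alt, pvKeywords]
  by_cases h22 : PySem.Str.isIn "saturate" f = true
  · simp_all [categorize_function_py, categorize_function_py_alt, pvKeywords]
  by_cases h23 : PySem.Str.isIn "sepia" f = true
  · simp_all [categorize_function_py, categorize_function_py_alt, pvKeywords]
  by_cases h24 : f = "circle"
  · subst h24; rfl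
  by_cases h25 : f = "ellipse"
  · subst h25; rfl
  by_cases h26 : f = "polygon"
  · subst h26; rfl
  by_cases h27 : f = "inset"
  · subst h27; rfl
  by_cases h28 : f = "path"
  · subst h28; rfl
  by_cases h29 : PySem.Str.isIn "gradient" f = true
  · simp_all [categorize_function_py, categorize_function_py_alt, pvKeywords]
  by_cases h30 : f = "minmax"
  · subst h30; rfl
  by_cases h31 : f = "fit_content"
  · subst h31; rfl
  by_cases h32 : f = "repeat"
  · subst h32; rfl
  by_cases h33 : PySem.Str.isIn "image" f = true
  · simp_all [categorize_function_py, categorize_function_py_alt, pvKeywords]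
  by_cases h34 : PySem.Str.isIn "cross_fade" f = true
  · simp_all [categorize_function_py, categorize_function_py_alt, pvKeywords]
  by_cases h35 : f = "attr"
  · subst h35; rfl
  by_cases h36 : f = "var"
  · subst h36; rfl
  by_cases h37 : f = "env"
  · subst h37; rfl
  by_cases h38 : PySem.Str.isIn "counter" f = true
  · simp_all [categorize_function_py, categorize_function_py_alt, pvKeywords]
  simp_all [categorize_function_py, categorize_function_py_alt, pvKeywords]
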